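-- pv_equiv track=rewrite | github.com/natan9064/implementation-works | heap_sort.py | sort_with_heap
-- ===== SOURCE A (Python) =====
-- def sift_down(array, size, root, swaps, checks):
--     largest = root
--     left_child = 2 * root + 1
--     right_child = 2 * root + 2
--
--     if left_child < size:
--         checks += 1
--         if array[left_child] > array[largest]:
--             largest = left_child
--
--     if right_child < size:
--         checks += 1
--         if array[right_child] > array[largest]:
--             largest = right_child
--
--     if largest != root:
--         array[root], array[largest] = array[largest], array[root]
--         swaps += 3
--         swaps, checks = sift_down(array, size, largest, swaps, checks)
--
--     return swaps, checks
--
-- def sort_with_heap(array):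
--     length = len(array)
--     swaps = 0
--     checks = 0
--
--     for root in range(length // 2 - 1, -1, -1):
--         swaps, checks = sift_down(array, length, root, swaps, checks)
--
--     for end in range(length - 1, 0, -1):
--         array[end], array[0] = array[0], array[end]
--         swaps += 3
--         swaps, checks = sift_down(array, end, 0, swaps, checks)
--
--     return swaps, checks
-- ===== SOURCE B (Python) =====
-- def _sift(array, size, root):
--     """Iterative sift-down; returns the (swaps, checks) this call contributed."""
--     swaps = 0
--     checks = 0
--     while True:
--         left = 2 * root + 1
--         if left + 1 < size:
--             children = (left, left + 1)
--         elif left < size: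
--             children = (left,)
--         else:
--             children = ()
--         checks += len(children)
--         largest = root
--         for c in children:
--             if array[c] > array[largest]:
--                 largest = c
--         if largest == root:
--             return swaps, checks
--         array[root], array[largest] = array[largest], array[root]
--         swaps += 3
--         root = largest
--
-- def sort_with_heap(array):
--     n = len(array)
--     swaps = 0
--     checks = 0
--     root = n // 2 - 1
--     while root >= 0:
--         s, c = _sift(array, n, root)
--         swaps += s
--         checks += c
--         root -= 1
--     end = n - 1
--     while end > 0:
--         array[end], array[0] = array[0], array[end]
--         swaps += 3
--         s, c = _sift(array, end, 0)
--         swaps += s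
--         checks += c
--         end -= 1
--     return swaps, checks
-- ===== Notes on version B (the rewrite author's own statement) =====
-- stated objective: alternative
-- what changed: sift_down is rewritten as an iterative while-loop that builds the in-range children list, selects the largest by a scan, and returns local (swaps, checks) deltas which the callers sum, replacing A's recursion that threads the accumulators; the drivers become explicit while-countdown loops.
import Mathlib
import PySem

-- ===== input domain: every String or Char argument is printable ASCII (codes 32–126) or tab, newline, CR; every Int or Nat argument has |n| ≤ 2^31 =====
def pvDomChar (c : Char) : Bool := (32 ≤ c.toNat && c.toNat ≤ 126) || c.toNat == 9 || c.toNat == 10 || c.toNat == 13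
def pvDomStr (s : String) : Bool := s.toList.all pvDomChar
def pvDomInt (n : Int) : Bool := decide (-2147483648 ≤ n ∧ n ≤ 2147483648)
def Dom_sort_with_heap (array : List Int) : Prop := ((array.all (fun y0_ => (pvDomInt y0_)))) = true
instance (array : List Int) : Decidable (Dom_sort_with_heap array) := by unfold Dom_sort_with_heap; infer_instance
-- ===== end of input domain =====

-- B differs from A by a different decomposition: an iterative sift-down (branch-built children list) returning local
-- (swaps, checks) deltas instead of A's recursion threading the accumulators, and while-loop
-- drivers instead of for-over-range.  Both Pythons mutate the argument list in place identically;
-- the equivalence proved here is about the RETURN value (the counter pair).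

-- ===== PORT A =====
-- Python's tuple swap `array[i], array[j] = array[j], array[i]` (indices always in range here).
def pySwap (a : List Int) (i j : Nat) : List Int :=
  (a.set i (a.getD j 0)).set j (a.getD i 0)

-- Recursive sift_down of A; `fuel` only makes the recursion structural: every call site passes
-- fuel = size + 1, and the root strictly increases below size each step, so fuel never runs out.
-- Indices are Nats and always in range (< size ≤ a.length) at every call, so `getD _ 0` is exact.
def siftA : Nat → List Int → Nat → Nat → Int → Int → List Int × Int × Int
  | 0, a, _, _, swaps, checks => (a, swaps, checks)
  | f + 1, a, size, root, swaps, checks =>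
    let left := 2 * root + 1
    let right := 2 * root + 2
    let checks1 := if left < size then checks + 1 else checks
    let largest1 := if left < size ∧ a.getD left 0 > a.getD root 0 then left else root
    let checks2 := if right < size then checks1 + 1 else checks1
    let largest2 := if right < size ∧ a.getD right 0 > a.getD largest1 0 then right else largest1
    if largest2 ≠ root then
      siftA f (pySwap a root largest2) size largest2 (swaps + 3) checks2
    else (a, swaps, checks2)

-- A's driver: range(length//2-1,-1,-1) = (List.range (length/2)).reverse,
-- range(length-1,0,-1) = (List.range' 1 (length-1)).reverse (as lists of Nat indices).
def sort_with_heap (array : List Int) : Int × Int :=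
  let length := array.length
  let st1 := (List.range (length / 2)).reverse.foldl
    (fun (st : List Int × Int × Int) root => siftA (length + 1) st.1 length root st.2.1 st.2.2)
    (array, 0, 0)
  let st2 := (List.range' 1 (length - 1)).reverse.foldl
    (fun (st : List Int × Int × Int) e => siftA (e + 1) (pySwap st.1 e 0) e 0 (st.2.1 + 3) st.2.2)
    st1
  (st2.2.1, st2.2.2)

-- ===== PORT B =====
def childrenOf (size root : Nat) : List Nat :=
  if 2 * root + 1 + 1 < size then [2 * root + 1, 2 * root + 1 + 1]
  else if 2 * root + 1 < size then [2 * root + 1]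
  else []

def argLargest (a : List Int) (root : Nat) (cs : List Nat) : Nat :=
  cs.foldl (fun l c => if a.getD c 0 > a.getD l 0 then c else l) root

-- B's iterative _sift: the while-loop as fuel recursion (fuel = size + 1, never exhausted);
-- returns the array plus this call's LOCAL (swaps, checks).
def siftB : Nat → List Int → Nat → Nat → List Int × Int × Int
  | 0, a, _, _ => (a, 0, 0)
  | f + 1, a, size, root =>
    let cs := childrenOf size root
    let largest := argLargest a root cs
    if largest = root then (a, 0, (cs.length : Int))
    else
      let r := siftB f (pySwap a root largest) size largest
      (r.1, 3 + r.2.1, (cs.length : Int) + r.2.2)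

-- `while root >= 0: ... root -= 1`, counter k = root + 1
def buildB (n : Nat) : Nat → List Int → Int → Int → List Int × Int × Int
  | 0, a, s, c => (a, s, c)
  | k + 1, a, s, c =>
    let r := siftB (n + 1) a n k
    buildB n k r.1 (s + r.2.1) (c + r.2.2)

-- `while end > 0: ... end -= 1`, counter = end
def extractB : Nat → List Int → Int → Int → List Int × Int × Int
  | 0, a, s, c => (a, s, c)
  | e + 1, a, s, c =>
    let a1 := pySwap a (e + 1) 0
    let r := siftB (e + 2) a1 (e + 1) 0
    extractB e r.1 (s + 3 + r.2.1) (c + r.2.2)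

def sort_with_heap_alt (array : List Int) : Int × Int :=
  let n := array.length
  let st1 := buildB n (n / 2) array 0 0
  let st2 := extractB (n - 1) st1.1 st1.2.1 st1.2.2
  (st2.2.1, st2.2.2)

-- ===== PRECONDITION & SPEC =====
def Spec_sort_with_heap (array : List Int) (out : Int × Int) : Prop := out = sort_with_heap_alt array
instance (array : List Int) (out : Int × Int) : Decidable (Spec_sort_with_heap array out) := by unfold Spec_sort_with_heap; infer_instance

-- ===== CLAIM (what is proved, stated in full; the proofs are below) =====
def Claim_equal_sort_with_heap : Prop := ∀ (array : List Int), Dom_sort_with_heap array → Spec_sort_with_heap array (sort_with_heap array)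

-- ===== LEMMAS AND PROOFS =====

-- A's threaded sift equals B's delta-returning sift, shifted by the incoming accumulators.
lemma sift_eq (f : Nat) : ∀ (a : List Int) (size root : Nat) (s c : Int),
    siftA f a size root s c =
      ((siftB f a size root).1, s + (siftB f a size root).2.1, c + (siftB f a size root).2.2) := by
  induction f with
  | zero => intro a size root s c; simp [siftA, siftB]
  | succ f ih =>
    intro a size root s c
    have hsel : ∀ (a : List Int) (size root : Nat),
        (if 2 * root + 2 < size ∧
             a.getD (2 * root + 2) 0 >
               a.getD (if 2 * root + 1 < size ∧ a.getD (2 * root + 1) 0 > a.getD root 0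
                       then 2 * root + 1 else root) 0
         then 2 * root + 2
         else if 2 * root + 1 < size ∧ a.getD (2 * root + 1) 0 > a.getD root 0
              then 2 * root + 1 else root) = argLargest a root (childrenOf size root) := by
      intro a size root
      by_cases hr : 2 * root + 2 < size
      · have hl : 2 * root + 1 < size := by omega
        simp [argLargest, childrenOf, hr, hl]
      · by_cases hl : 2 * root + 1 < size
        · simp [argLargest, childrenOf, hr, hl]
        · simp [argLargest, childrenOf, hr, hl]
    have hchk : ∀ (size root : Nat) (c : Int),
        (if 2 * root + 2 < size then (if 2 * root + 1 < size then c + 1 else c) + 1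
         else (if 2 * root + 1 < size then c + 1 else c)) =
          c + ((childrenOf size root).length : Int) := by
      intro size root c
      by_cases hr : 2 * root + 2 < size
      · have hl : 2 * root + 1 < size := by omega
        simp [childrenOf, hr, hl]; ring
      · by_cases hl : 2 * root + 1 < size <;> simp [childrenOf, hr, hl]
    show (let left := 2 * root + 1; _) = _
    simp only [siftA, siftB]
    rw [hsel a size root, hchk size root c]
    by_cases h : argLargest a root (childrenOf size root) = root
    · simp [h]
    · simp only [h, ne_eq, not_false_iff, if_true]
      rw [ih]
      simp only [if_false, Prod.mk.injEq]
      exact ⟨trivial, by ring, by ring⟩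

lemma build_eq (n : Nat) : ∀ (k : Nat) (a : List Int) (s c : Int),
    (List.range k).reverse.foldl
      (fun (st : List Int × Int × Int) root => siftA (n + 1) st.1 n root st.2.1 st.2.2)
      (a, s, c) = buildB n k a s c := by
  intro k
  induction k with
  | zero => intro a s c; simp [buildB]
  | succ k ih =>
    intro a s c
    rw [List.range_succ, List.reverse_append]
    simp only [List.reverse_singleton, List.singleton_append, List.foldl_cons]
    rw [sift_eq, buildB]
    exact ih _ _ _

lemma extract_eq : ∀ (m : Nat) (a : List Int) (s c : Int),
    (List.range' 1 m).reverse.foldl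
      (fun (st : List Int × Int × Int) e => siftA (e + 1) (pySwap st.1 e 0) e 0 (st.2.1 + 3) st.2.2)
      (a, s, c) = extractB m a s c := by
  intro m
  induction m with
  | zero => intro a s c; simp [extractB]
  | succ m ih =>
    intro a s c
    rw [List.range'_1_concat, List.reverse_append]
    simp only [List.reverse_singleton, List.singleton_append, List.foldl_cons]
    rw [sift_eq, extractB]
    have : 1 + m = m + 1 := by omega
    rw [this] at *
    exact ih _ _ _

-- ===== VERDICT (by name: the statement is the Claim_ definition above) =====
theorem sort_with_heap_spec : Claim_equal_sort_with_heap := by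
  intro array _
  unfold Spec_sort_with_heap sort_with_heap sort_with_heap_alt
  simp only
  rw [build_eq, extract_eq]
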